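-- pv_equiv track=rewrite | github.com/Joezhou1211/MahJong_Hu_Calculator | MaJiang/main.py | find_possible_hu
-- ===== SOURCE A (Python) =====
-- def dfs_melds(cards, path=[]):
--     if not cards:
--         return [path]
--
--     unique_cards = sorted(set(cards))
--     all_results = []
--
--     # 处理刻子
--     for card in unique_cards:
--         if cards.count(card) >= 3:
--             new_cards = cards.copy()
--             for _ in range(3):
--                 new_cards.remove(card)
--             results = dfs_melds(new_cards, path + [(card, card, card)])
--             for result in results:
--                 all_results.append(result)
--
--     # 处理顺子
--     for i in range(len(unique_cards) - 2):
--         if unique_cards[i] + 1 in unique_cards and unique_cards[i] + 2 in unique_cards: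
--             seq_start = unique_cards[i]
--             if cards.count(seq_start) > 0 and cards.count(seq_start + 1) > 0 and cards.count(seq_start + 2) > 0:
--                 new_cards = cards.copy()
--                 new_cards.remove(seq_start)
--                 new_cards.remove(seq_start + 1)
--                 new_cards.remove(seq_start + 2)
--                 results = dfs_melds(new_cards, path + [(seq_start, seq_start + 1, seq_start + 2)])
--                 for result in results:
--                     all_results.append(result)
--
--     return all_results if all_results else []
--
-- def check_hu(cards):
--     if len(cards) % 3 != 2:
--         return False
--
--     pairs = [c for c in set(cards) if cards.count(c) >= 2]
--     for pair in pairs: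
--         hand_copy = cards[:]
--         hand_copy.remove(pair)
--         hand_copy.remove(pair)
--         melds_result = dfs_melds(hand_copy)
--         if melds_result:
--             return True
--     return False
--
-- def find_possible_hu(cards):
--     possible_hu = []
--     for i in range(1, 30):  # 检查所有可能的牌（1-9万，11-19筒，21-29条）
--         if i in [10, 20]:
--             continue
--         if cards == [i] and len(cards + [i]) == 2:
--             possible_hu.append(i)
--             return possible_hu
--         if check_hu(cards + [i]):
--             possible_hu.append(i)
--     return possible_hu
-- ===== SOURCE B (Python) =====
-- def _melds(hand):
--     # hand is sorted ascending; True iff it splits into triplets and runs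
--     if not hand:
--         return True
--     m = hand[0]
--     if len(hand) >= 3 and hand[1] == m and hand[2] == m and _melds(hand[3:]):
--         return True
--     return _melds_run(m, hand[1:])
--
-- def _melds_run(m, rest):
--     # try the run m, m+1, m+2 using the tiles after the smallest tile m
--     if (m + 1) in rest and (m + 2) in rest:
--         rest = rest.copy()
--         rest.remove(m + 1)
--         rest.remove(m + 2)
--         return _melds(rest)
--     return False
--
-- def _scan_pair(pre, hand):
--     # try every adjacent duplicate as the pair of a sorted hand
--     if len(hand) < 2:
--         return False
--     if hand[0] == hand[1] and _melds(pre + hand[2:]):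
--         return True
--     return _scan_pair(pre + [hand[0]], hand[1:])
--
-- def _wins(hand):
--     # hand sorted ascending
--     if len(hand) % 3 != 2:
--         return False
--     return _scan_pair([], hand)
--
-- def find_possible_hu(cards):
--     res = []
--     if len(cards) % 3 != 1:
--         return res
--     for i in range(1, 30):
--         if i == 10 or i == 20:
--             continue
--         if _wins(sorted(cards + [i])):
--             res.append(i)
--     return res
-- ===== Notes on version B (the rewrite author's own statement) =====
-- stated objective: alternative
-- what changed: A enumerates every complete meld decomposition of the hand (trying every tile as a triplet and every possible run at each level, collecting all results); B sorts the hand once per candidate, tries each adjacent duplicate as the pair, and runs a boolean search that branches only on the smallest remaining tile (its triplet or the run starting at it) and stops at the first success.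
import Mathlib
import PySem

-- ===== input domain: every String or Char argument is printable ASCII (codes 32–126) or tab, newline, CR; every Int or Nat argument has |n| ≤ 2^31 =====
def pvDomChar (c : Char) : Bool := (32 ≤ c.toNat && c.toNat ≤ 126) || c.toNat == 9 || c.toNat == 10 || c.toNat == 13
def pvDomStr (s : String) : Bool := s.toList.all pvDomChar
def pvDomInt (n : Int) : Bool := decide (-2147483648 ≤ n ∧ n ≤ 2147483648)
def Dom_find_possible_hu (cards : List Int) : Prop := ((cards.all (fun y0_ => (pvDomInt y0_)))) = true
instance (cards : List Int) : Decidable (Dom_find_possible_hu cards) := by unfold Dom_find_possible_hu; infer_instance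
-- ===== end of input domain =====

-- B replaces A's exhaustive enumeration of every meld decomposition with a boolean search on the
-- sorted hand that branches only on the smallest tile (triplet of it, or the run starting at it)
-- and stops at the first success.

-- ===== PORT A =====

-- cards.remove(x): Python raises ValueError when x is absent; every call in A is guarded by a
-- count/membership check, so the .getD fallback (return the list unchanged) is unreachable.
def pyRemove (l : List Int) (x : Int) : List Int := (PySem.List.remove? l x).getD l

theorem pyRemove_eq_erase {l : List Int} {x : Int} (h : x ∈ l) : pyRemove l x = l.erase x := by
  simp [pyRemove, PySem.List.remove?_eq_some_erase l x h]

theorem pyRemove_length_le (l : List Int) (x : Int) : (pyRemove l x).length ≤ l.length := by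
  by_cases h : x ∈ l
  · rw [pyRemove_eq_erase h, List.length_erase_of_mem h]; omega
  · simp [pyRemove, (PySem.List.remove?_eq_none_iff (xs := l) (v := x)).2 h]

theorem trip_len {l : List Int} {c : Int} (h : 3 ≤ PySem.List.count l c) :
    (pyRemove (pyRemove (pyRemove l c) c) c).length + 3 = l.length := by
  rw [PySem.List.count_eq] at h
  have h1 : c ∈ l := List.count_pos_iff.1 (by omega)
  have h2 : c ∈ l.erase c := List.count_pos_iff.1 (by rw [List.count_erase_self]; omega)
  have h3 : c ∈ (l.erase c).erase c := List.count_pos_iff.1 (by rw [List.count_erase_self, List.count_erase_self]; omega)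
  rw [pyRemove_eq_erase h1, pyRemove_eq_erase h2, pyRemove_eq_erase h3,
      List.length_erase_of_mem h3, List.length_erase_of_mem h2, List.length_erase_of_mem h1]
  have q1 : 0 < (l.erase c).length := List.length_pos_of_mem h2
  have q2 : 0 < ((l.erase c).erase c).length := List.length_pos_of_mem h3
  rw [List.length_erase_of_mem h2, List.length_erase_of_mem h1] at q2
  rw [List.length_erase_of_mem h1] at q1
  omega

theorem run_len {l : List Int} {a : Int} (h1 : a ∈ l) (h2 : (a+1) ∈ l) (h3 : (a+2) ∈ l) :
    (pyRemove (pyRemove (pyRemove l a) (a+1)) (a+2)).length + 3 = l.length := by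
  have h2' : (a+1) ∈ l.erase a := by
    rw [List.mem_erase_of_ne (by omega)]; exact h2
  have h3' : (a+2) ∈ (l.erase a).erase (a+1) := by
    rw [List.mem_erase_of_ne (by omega), List.mem_erase_of_ne (by omega)]; exact h3
  rw [pyRemove_eq_erase h1, pyRemove_eq_erase h2', pyRemove_eq_erase h3',
      List.length_erase_of_mem h3', List.length_erase_of_mem h2', List.length_erase_of_mem h1]
  have q1 : 0 < (l.erase a).length := List.length_pos_of_mem h2'
  have q2 : 0 < ((l.erase a).erase (a+1)).length := List.length_pos_of_mem h3'
  rw [List.length_erase_of_mem h2', List.length_erase_of_mem h1] at q2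
  rw [List.length_erase_of_mem h1] at q1
  omega

mutual
-- dfs_melds(cards, path); the two inner 'for' loops are dfsTrip (over unique_cards) and
-- dfsRun (over range(len(unique_cards)-2), i.e. the heads of the suffixes of length ≥ 3).
def dfsMelds (cards : List Int) (path : List (Int × Int × Int)) : List (List (Int × Int × Int)) :=
  if cards = [] then [path]
  else
    let unique := PySem.List.sorted (PySem.Set.ofList cards) (fun x => x) false
    let all := dfsTrip cards path unique ++ dfsRun cards path unique unique
    if all = [] then [] else all
termination_by (cards.length + 1, 0)

def dfsTrip (cards : List Int) (path : List (Int × Int × Int)) : List Int → List (List (Int × Int × Int))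
  | [] => []
  | c :: rest =>
    (if h : 3 ≤ PySem.List.count cards c then
      dfsMelds (pyRemove (pyRemove (pyRemove cards c) c) c) (path ++ [(c, c, c)])
     else []) ++ dfsTrip cards path rest
termination_by l => (cards.length, l.length)
decreasing_by
  all_goals first
    | (apply Prod.Lex.right; simp)
    | (apply Prod.Lex.left; have := trip_len h; omega)

def dfsRun (cards : List Int) (path : List (Int × Int × Int)) (unique : List Int) : List Int → List (List (Int × Int × Int))
  | a :: b :: c :: rest =>
    (if (a + 1) ∈ unique ∧ (a + 2) ∈ unique then
       if h : 0 < PySem.List.count cards a ∧ 0 < PySem.List.count cards (a + 1) ∧ 0 < PySem.List.count cards (a + 2) then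
         dfsMelds (pyRemove (pyRemove (pyRemove cards a) (a + 1)) (a + 2)) (path ++ [(a, a + 1, a + 2)])
       else []
     else []) ++ dfsRun cards path unique (b :: c :: rest)
  | _ => []
termination_by l => (cards.length, l.length)
decreasing_by
  all_goals first
    | (apply Prod.Lex.right; simp)
    | (apply Prod.Lex.left
       obtain ⟨ha, hb, hc⟩ := h
       rw [PySem.List.count_eq] at ha hb hc
       have := run_len (List.count_pos_iff.1 ha) (List.count_pos_iff.1 hb) (List.count_pos_iff.1 hc)
       omega)
end

-- the 'for pair in pairs' loop of check_hu (early return on the first nonempty dfs result)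
def checkLoop (cards : List Int) : List Int → Bool
  | [] => false
  | p :: rest =>
    if dfsMelds (pyRemove (pyRemove cards p) p) [] ≠ [] then true
    else checkLoop cards rest

def check_hu (cards : List Int) : Bool :=
  if cards.length % 3 ≠ 2 then false
  else checkLoop cards ((PySem.Set.ofList cards).filter (fun c => decide (2 ≤ PySem.List.count cards c)))

-- the 'for i in range(1, 30)' loop of find_possible_hu, with its early return
def fphLoop (cards : List Int) (acc : List Int) : List Int → List Int
  | [] => acc
  | i :: rest =>
    if i ∈ ([10, 20] : List Int) then fphLoop cards acc rest
    else if cards = [i] ∧ (cards ++ [i]).length = 2 then acc ++ [i]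
    else if check_hu (cards ++ [i]) = true then fphLoop cards (acc ++ [i]) rest
    else fphLoop cards acc rest

def find_possible_hu (cards : List Int) : List Int :=
  fphLoop cards [] (PySem.List.pyRange 1 30 1)

-- ===== PORT B =====

-- _melds(hand) of Source B: hand is sorted; triplet of the head, or (_melds_run) the run starting at it
mutual
def melds_alt : List Int → Bool
  | [] => true
  | m :: b :: c :: t' =>
    (if b = m ∧ c = m then melds_alt t' else false) || meldsRun m (b :: c :: t')
  | m :: t => false || meldsRun m t
termination_by l => (l.length, 1)
decreasing_by
  all_goals first
    | (apply Prod.Lex.left; simp; omega)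
    | (simp only [List.length_cons]; exact Prod.Lex.right _ (by omega))

def meldsRun (m : Int) (rest : List Int) : Bool :=
  if (m + 1) ∈ rest ∧ (m + 2) ∈ rest then
    melds_alt (pyRemove (pyRemove rest (m + 1)) (m + 2))
  else false
termination_by (rest.length + 1, 0)
decreasing_by
  apply Prod.Lex.left
  have q1 := pyRemove_length_le rest (m+1)
  have q2 := pyRemove_length_le (pyRemove rest (m+1)) (m+2)
  omega
end

-- _scan_pair(pre, hand) of Source B
def scanPair (pre : List Int) : List Int → Bool
  | a :: b :: rest =>
    if a = b ∧ melds_alt (pre ++ rest) = true then true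
    else scanPair (pre ++ [a]) (b :: rest)
  | _ => false
termination_by l => l.length

-- _wins(hand) of Source B
def wins (hand : List Int) : Bool :=
  if hand.length % 3 ≠ 2 then false else scanPair [] hand

def find_possible_hu_alt (cards : List Int) : List Int :=
  if cards.length % 3 ≠ 1 then []
  else (PySem.List.pyRange 1 30 1).foldl
    (fun acc i =>
      if i = 10 ∨ i = 20 then acc
      else if wins (PySem.List.sorted (cards ++ [i]) (fun x => x) false) = true then acc ++ [i]
      else acc) []

-- ===== PRECONDITION & SPEC =====
def Spec_find_possible_hu (cards : List Int) (out : List Int) : Prop := out = find_possible_hu_alt cards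
instance (cards : List Int) (out : List Int) : Decidable (Spec_find_possible_hu cards out) := by unfold Spec_find_possible_hu; infer_instance

-- ===== CLAIM (what is proved, stated in full; the proofs are below) =====
def Claim_equal_find_possible_hu : Prop := ∀ (cards : List Int), Dom_find_possible_hu cards → Spec_find_possible_hu cards (find_possible_hu cards)

-- ===== LEMMAS AND PROOFS =====

-- 'the multiset splits into triplets (c,c,c) and runs (c,c+1,c+2)'
inductive Decomp : Multiset Int → Prop
  | nil : Decomp 0
  | trip (c : Int) (s : Multiset Int) : Decomp s → Decomp (c ::ₘ c ::ₘ c ::ₘ s)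
  | run (c : Int) (s : Multiset Int) : Decomp s → Decomp (c ::ₘ (c+1) ::ₘ (c+2) ::ₘ s)

-- 'the hand wins': a pair plus a meld decomposition of the rest
def WinsPred (h : List Int) : Prop :=
  h.length % 3 = 2 ∧ ∃ p : Int, 2 ≤ h.count p ∧ Decomp (((↑h : Multiset Int).erase p).erase p)

theorem decomp_card {s : Multiset Int} (h : Decomp s) : Multiset.card s % 3 = 0 := by
  induction h with
  | nil => rfl
  | trip c s _ ih => simp [Multiset.card_cons]; omega
  | run c s _ ih => simp [Multiset.card_cons]; omega

theorem erase_cons_comm (c : Int) {u : Multiset Int} {v : Int} (h : v ∈ u) :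
    (c ::ₘ u).erase v = c ::ₘ u.erase v := by
  by_cases hv : v = c
  · subst hv
    rw [Multiset.erase_cons_head]
    exact (Multiset.cons_erase h).symm
  · exact Multiset.erase_cons_tail u (fun hh => hv hh.symm)

theorem cons3_erase_trip {s : Multiset Int} {m : Int} (h : 3 ≤ s.count m) :
    s = m ::ₘ m ::ₘ m ::ₘ (((s.erase m).erase m).erase m) := by
  have h1 : m ∈ s := Multiset.count_pos.1 (by omega)
  have h2 : m ∈ s.erase m := Multiset.count_pos.1 (by rw [Multiset.count_erase_self]; omega)
  have h3 : m ∈ (s.erase m).erase m := Multiset.count_pos.1 (by rw [Multiset.count_erase_self, Multiset.count_erase_self]; omega)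
  rw [Multiset.cons_erase h3, Multiset.cons_erase h2, Multiset.cons_erase h1]

theorem cons3_erase_run {s : Multiset Int} {m : Int} (h1 : m ∈ s) (h2 : (m+1) ∈ s) (h3 : (m+2) ∈ s) :
    s = m ::ₘ (m+1) ::ₘ (m+2) ::ₘ (((s.erase m).erase (m+1)).erase (m+2)) := by
  have h2' : (m+1) ∈ s.erase m := (Multiset.mem_erase_of_ne (by omega)).2 h2
  have h3' : (m+2) ∈ (s.erase m).erase (m+1) := by
    rw [Multiset.mem_erase_of_ne (by omega), Multiset.mem_erase_of_ne (by omega)]; exact h3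
  rw [Multiset.cons_erase h3', Multiset.cons_erase h2', Multiset.cons_erase h1]


theorem erase_cons3 (c1 c2 c3 : Int) {s : Multiset Int} {v : Int} (h : v ∈ s) :
    (c1 ::ₘ c2 ::ₘ c3 ::ₘ s).erase v = c1 ::ₘ c2 ::ₘ c3 ::ₘ s.erase v := by
  rw [erase_cons_comm c1 (Multiset.mem_cons_of_mem (Multiset.mem_cons_of_mem h)),
      erase_cons_comm c2 (Multiset.mem_cons_of_mem h), erase_cons_comm c3 h]

theorem erase3_cons3 (c1 c2 c3 : Int) {s : Multiset Int} {v1 v2 v3 : Int}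
    (e1 : v1 ∈ s) (e2 : v2 ∈ s.erase v1) (e3 : v3 ∈ (s.erase v1).erase v2) :
    (((c1 ::ₘ c2 ::ₘ c3 ::ₘ s).erase v1).erase v2).erase v3 =
      c1 ::ₘ c2 ::ₘ c3 ::ₘ (((s.erase v1).erase v2).erase v3) := by
  rw [erase_cons3 c1 c2 c3 e1, erase_cons3 c1 c2 c3 e2, erase_cons3 c1 c2 c3 e3]

theorem decomp_min {s : Multiset Int} (hd : Decomp s) :
    ∀ m : Int, m ∈ s → (∀ x ∈ s, m ≤ x) →
    (3 ≤ s.count m ∧ Decomp (((s.erase m).erase m).erase m)) ∨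
    ((m+1) ∈ s ∧ (m+2) ∈ s ∧ Decomp (((s.erase m).erase (m+1)).erase (m+2))) := by
  induction hd with
  | nil => intro m hm _; simp at hm
  | trip c s hs ih =>
    intro m hm hmin
    by_cases hmc : m = c
    · subst hmc
      left
      refine ⟨by simp, ?_⟩
      rw [Multiset.erase_cons_head, Multiset.erase_cons_head, Multiset.erase_cons_head]
      exact hs
    · have hms : m ∈ s := by
        simp only [Multiset.mem_cons] at hm
        rcases hm with h | h | h | h <;> first | (exact absurd h hmc) | exact h
      have hmin' : ∀ x ∈ s, m ≤ x := fun x hx => hmin x (by simp [Multiset.mem_cons, hx])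
      rcases ih m hms hmin' with ⟨hc, hdec⟩ | ⟨ha, hb, hdec⟩
      · left
        have e2 : m ∈ s.erase m := Multiset.count_pos.1 (by rw [Multiset.count_erase_self]; omega)
        have e3 : m ∈ (s.erase m).erase m := Multiset.count_pos.1 (by rw [Multiset.count_erase_self, Multiset.count_erase_self]; omega)
        refine ⟨?_, ?_⟩
        · rw [Multiset.count_cons_of_ne hmc, Multiset.count_cons_of_ne hmc, Multiset.count_cons_of_ne hmc]; exact hc
        · rw [erase3_cons3 c c c hms e2 e3]
          exact Decomp.trip c _ hdec
      · right
        have e2 : (m+1) ∈ s.erase m := (Multiset.mem_erase_of_ne (by omega)).2 ha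
        have e3 : (m+2) ∈ (s.erase m).erase (m+1) := by
          rw [Multiset.mem_erase_of_ne (by omega), Multiset.mem_erase_of_ne (by omega)]; exact hb
        refine ⟨Multiset.mem_cons_of_mem (Multiset.mem_cons_of_mem (Multiset.mem_cons_of_mem ha)),
                Multiset.mem_cons_of_mem (Multiset.mem_cons_of_mem (Multiset.mem_cons_of_mem hb)), ?_⟩
        rw [erase3_cons3 c c c hms e2 e3]
        exact Decomp.trip c _ hdec
  | run c s hs ih =>
    intro m hm hmin
    have hmc_le : m ≤ c := hmin c (by simp)
    by_cases hmeld : m = c ∨ m = c + 1 ∨ m = c + 2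
    · have hmc : m = c := by
        rcases hmeld with h | h | h
        · exact h
        · omega
        · omega
      subst hmc
      right
      refine ⟨by simp, by simp, ?_⟩
      rw [Multiset.erase_cons_head, Multiset.erase_cons_head, Multiset.erase_cons_head]
      exact hs
    · push_neg at hmeld
      obtain ⟨n1, n2, n3⟩ := hmeld
      have hms : m ∈ s := by
        simp only [Multiset.mem_cons] at hm
        rcases hm with h | h | h | h
        · exact absurd h n1
        · exact absurd h n2
        · exact absurd h n3
        · exact h
      have hmin' : ∀ x ∈ s, m ≤ x := fun x hx => hmin x (by simp [Multiset.mem_cons, hx])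
      rcases ih m hms hmin' with ⟨hc, hdec⟩ | ⟨ha, hb, hdec⟩
      · left
        have e2 : m ∈ s.erase m := Multiset.count_pos.1 (by rw [Multiset.count_erase_self]; omega)
        have e3 : m ∈ (s.erase m).erase m := Multiset.count_pos.1 (by rw [Multiset.count_erase_self, Multiset.count_erase_self]; omega)
        refine ⟨?_, ?_⟩
        · rw [Multiset.count_cons_of_ne n1, Multiset.count_cons_of_ne n2, Multiset.count_cons_of_ne n3]; exact hc
        · rw [erase3_cons3 c (c+1) (c+2) hms e2 e3]
          exact Decomp.run c _ hdec
      · right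
        have e2 : (m+1) ∈ s.erase m := (Multiset.mem_erase_of_ne (by omega)).2 ha
        have e3 : (m+2) ∈ (s.erase m).erase (m+1) := by
          rw [Multiset.mem_erase_of_ne (by omega), Multiset.mem_erase_of_ne (by omega)]; exact hb
        refine ⟨Multiset.mem_cons_of_mem (Multiset.mem_cons_of_mem (Multiset.mem_cons_of_mem ha)),
                Multiset.mem_cons_of_mem (Multiset.mem_cons_of_mem (Multiset.mem_cons_of_mem hb)), ?_⟩
        rw [erase3_cons3 c (c+1) (c+2) hms e2 e3]
        exact Decomp.run c _ hdec

theorem dfsTrip_ne_nil_iff (cards : List Int) (path : List (Int × Int × Int)) (l : List Int) :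
    dfsTrip cards path l ≠ [] ↔
    ∃ c ∈ l, 3 ≤ PySem.List.count cards c ∧
      dfsMelds (pyRemove (pyRemove (pyRemove cards c) c) c) (path ++ [(c, c, c)]) ≠ [] := by
  induction l with
  | nil => simp [dfsTrip]
  | cons c rest ih =>
    rw [dfsTrip]
    rw [ne_eq, List.append_eq_nil_iff, not_and_or, ← ne_eq, ← ne_eq, ih]
    by_cases hc : 3 ≤ PySem.List.count cards c
    · rw [dif_pos hc]
      constructor
      · rintro (h | ⟨a, ha, h1, h2⟩)
        · exact ⟨c, List.mem_cons_self, hc, h⟩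
        · exact ⟨a, List.mem_cons_of_mem _ ha, h1, h2⟩
      · rintro ⟨a, ha, h1, h2⟩
        rcases List.mem_cons.1 ha with rfl | ha'
        · exact Or.inl h2
        · exact Or.inr ⟨a, ha', h1, h2⟩
    · rw [dif_neg hc]
      simp only [ne_eq, not_true_eq_false, false_or]
      constructor
      · rintro ⟨a, ha, h1, h2⟩
        exact ⟨a, List.mem_cons_of_mem _ ha, h1, h2⟩
      · rintro ⟨a, ha, h1, h2⟩
        rcases List.mem_cons.1 ha with rfl | ha'
        · exact absurd h1 hc
        · exact ⟨a, ha', h1, h2⟩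

theorem dfsRun_ne_nil_iff (cards : List Int) (path : List (Int × Int × Int)) (unique : List Int) (l : List Int) :
    dfsRun cards path unique l ≠ [] ↔
    ∃ a ∈ l.take (l.length - 2),
      ((a + 1) ∈ unique ∧ (a + 2) ∈ unique) ∧
      (0 < PySem.List.count cards a ∧ 0 < PySem.List.count cards (a + 1) ∧ 0 < PySem.List.count cards (a + 2)) ∧
      dfsMelds (pyRemove (pyRemove (pyRemove cards a) (a + 1)) (a + 2)) (path ++ [(a, a + 1, a + 2)]) ≠ [] := by
  induction l with
  | nil => simp [dfsRun]
  | cons a tail ih =>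
    cases tail with
    | nil => simp [dfsRun]
    | cons b tail2 =>
      cases tail2 with
      | nil => simp [dfsRun]
      | cons c rest =>
        rw [dfsRun]
        rw [ne_eq, List.append_eq_nil_iff, not_and_or, ← ne_eq, ← ne_eq, ih]
        have htake : (a :: b :: c :: rest).take ((a :: b :: c :: rest).length - 2) =
            a :: (b :: c :: rest).take ((b :: c :: rest).length - 2) := by
          simp [List.length_cons]
        rw [htake]
        constructor
        · rintro (h | ⟨x, hx, h1, h2, h3⟩)
          · by_cases hm : (a + 1) ∈ unique ∧ (a + 2) ∈ unique
            · rw [if_pos hm] at h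
              by_cases hcnt : 0 < PySem.List.count cards a ∧ 0 < PySem.List.count cards (a + 1) ∧ 0 < PySem.List.count cards (a + 2)
              · rw [dif_pos hcnt] at h
                exact ⟨a, List.mem_cons_self, hm, hcnt, h⟩
              · rw [dif_neg hcnt] at h; exact absurd rfl h
            · rw [if_neg hm] at h; exact absurd rfl h
          · exact ⟨x, List.mem_cons_of_mem _ hx, h1, h2, h3⟩
        · rintro ⟨x, hx, h1, h2, h3⟩
          rcases List.mem_cons.1 hx with rfl | hx'
          · left; rw [if_pos h1, dif_pos h2]; exact h3
          · right; exact ⟨x, hx', h1, h2, h3⟩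

theorem trip_coe {l : List Int} {c : Int} (h : 3 ≤ PySem.List.count l c) :
    (↑(pyRemove (pyRemove (pyRemove l c) c) c) : Multiset Int) =
      (((↑l : Multiset Int).erase c).erase c).erase c := by
  rw [PySem.List.count_eq] at h
  have h1 : c ∈ l := List.count_pos_iff.1 (by omega)
  have h2 : c ∈ l.erase c := List.count_pos_iff.1 (by rw [List.count_erase_self]; omega)
  have h3 : c ∈ (l.erase c).erase c := List.count_pos_iff.1 (by rw [List.count_erase_self, List.count_erase_self]; omega)
  rw [pyRemove_eq_erase h1, pyRemove_eq_erase h2, pyRemove_eq_erase h3,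
      Multiset.coe_erase, Multiset.coe_erase, Multiset.coe_erase]

theorem run_coe {l : List Int} {a : Int} (h1 : a ∈ l) (h2 : (a+1) ∈ l) (h3 : (a+2) ∈ l) :
    (↑(pyRemove (pyRemove (pyRemove l a) (a+1)) (a+2)) : Multiset Int) =
      (((↑l : Multiset Int).erase a).erase (a+1)).erase (a+2) := by
  have h2' : (a+1) ∈ l.erase a := by rw [List.mem_erase_of_ne (by omega)]; exact h2
  have h3' : (a+2) ∈ (l.erase a).erase (a+1) := by
    rw [List.mem_erase_of_ne (by omega), List.mem_erase_of_ne (by omega)]; exact h3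
  rw [pyRemove_eq_erase h1, pyRemove_eq_erase h2', pyRemove_eq_erase h3',
      Multiset.coe_erase, Multiset.coe_erase, Multiset.coe_erase]

theorem pair_coe {l : List Int} {p : Int} (h : 2 ≤ l.count p) :
    (↑(pyRemove (pyRemove l p) p) : Multiset Int) = ((↑l : Multiset Int).erase p).erase p := by
  have h1 : p ∈ l := List.count_pos_iff.1 (by omega)
  have h2 : p ∈ l.erase p := List.count_pos_iff.1 (by rw [List.count_erase_self]; omega)
  rw [pyRemove_eq_erase h1, pyRemove_eq_erase h2, Multiset.coe_erase, Multiset.coe_erase]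

theorem trip_list_eq {l : List Int} {c : Int} (h : 3 ≤ PySem.List.count l c) :
    (↑l : Multiset Int) = c ::ₘ c ::ₘ c ::ₘ ↑(pyRemove (pyRemove (pyRemove l c) c) c) := by
  rw [trip_coe h]
  exact cons3_erase_trip (by rw [Multiset.coe_count]; rw [PySem.List.count_eq] at h; exact h)

theorem run_list_eq {l : List Int} {a : Int} (h1 : a ∈ l) (h2 : (a+1) ∈ l) (h3 : (a+2) ∈ l) :
    (↑l : Multiset Int) = a ::ₘ (a+1) ::ₘ (a+2) ::ₘ ↑(pyRemove (pyRemove (pyRemove l a) (a+1)) (a+2)) := by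
  rw [run_coe h1 h2 h3]
  exact cons3_erase_run (Multiset.mem_coe.2 h1) (Multiset.mem_coe.2 h2) (Multiset.mem_coe.2 h3)

theorem mem_take_head {a : Int} {t : List Int} {k : Nat} (h : 1 ≤ k) : a ∈ (a :: t).take k := by
  cases k with
  | zero => omega
  | succ k => simp [List.take_succ_cons]

theorem two_mem_length {x y : Int} {t : List Int} (hx : x ∈ t) (hy : y ∈ t) (hxy : x ≠ y) :
    2 ≤ t.length := by
  cases t with
  | nil => simp at hx
  | cons a t2 =>
    cases t2 with
    | nil =>
      simp at hx hy
      exact absurd (hx.trans hy.symm) hxy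
    | cons b t3 => simp

theorem dfs_iff : ∀ (cards : List Int) (path : List (Int × Int × Int)),
    (dfsMelds cards path ≠ [] ↔ Decomp (↑cards : Multiset Int)) := by
  suffices H : ∀ (n : Nat) (cards : List Int), cards.length ≤ n →
      ∀ (path : List (Int × Int × Int)), (dfsMelds cards path ≠ [] ↔ Decomp (↑cards : Multiset Int)) by
    intro cards path
    exact H cards.length cards le_rfl path
  intro n
  induction n with
  | zero =>
    intro cards hlen path
    have hnil : cards = [] := List.eq_nil_of_length_eq_zero (by omega)
    subst hnil
    rw [dfsMelds, if_pos rfl]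
    constructor
    · intro _; exact Decomp.nil
    · intro _; simp
  | succ n ih =>
    intro cards hlen path
    by_cases hnil : cards = []
    · subst hnil
      rw [dfsMelds, if_pos rfl]
      constructor
      · intro _; exact Decomp.nil
      · intro _; simp
    · rw [dfsMelds, if_neg hnil]
      have hguard : ∀ (L : List (List (Int × Int × Int))), (if L = [] then ([] : List (List (Int × Int × Int))) else L) ≠ [] ↔ L ≠ [] := by
        intro L; split_ifs with h
        · simp [h]
        · tauto
      rw [hguard]
      rw [ne_eq, List.append_eq_nil_iff, not_and_or, ← ne_eq, ← ne_eq,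
          dfsTrip_ne_nil_iff, dfsRun_ne_nil_iff]
      constructor
      · rintro (⟨c, _, hcnt, hsub⟩ | ⟨a, _, ⟨_, _⟩, ⟨hc1, hc2, hc3⟩, hsub⟩)
        · have hlen3 := trip_len hcnt
          have hdec := (ih _ (by omega) _).1 hsub
          rw [trip_list_eq hcnt]
          exact Decomp.trip _ _ hdec
        · rw [PySem.List.count_eq] at hc1 hc2 hc3
          have m1 : a ∈ cards := List.count_pos_iff.1 hc1
          have m2 : (a+1) ∈ cards := List.count_pos_iff.1 hc2
          have m3 : (a+2) ∈ cards := List.count_pos_iff.1 hc3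
          have hlen3 := run_len m1 m2 m3
          have hdec := (ih _ (by omega) _).1 hsub
          rw [run_list_eq m1 m2 m3]
          exact Decomp.run _ _ hdec
      · intro hdec
        obtain ⟨m, t, hut⟩ : ∃ m t,
            PySem.List.sorted (PySem.Set.ofList cards) (fun x => x) false = m :: t := by
          cases hu' : PySem.List.sorted (PySem.Set.ofList cards) (fun x => x) false with
          | nil =>
            exfalso
            obtain ⟨x, hx⟩ := List.exists_mem_of_ne_nil cards hnil
            have : x ∈ PySem.List.sorted (PySem.Set.ofList cards) (fun x => x) false :=
              (PySem.List.mem_sorted _ _ _ _).2 ((PySem.Set.mem_ofList _ _).2 hx)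
            rw [hu'] at this
            simp at this
          | cons m t => exact ⟨m, t, rfl⟩
        have hmin : ∀ y ∈ cards, m ≤ y := by
          intro y hy
          exact PySem.List.key_head_sorted_le _ _ hut y ((PySem.Set.mem_ofList _ _).2 hy)
        have hm_cards : m ∈ cards :=
          (PySem.Set.mem_ofList _ _).1 ((PySem.List.mem_sorted _ _ _ _).1 (hut ▸ List.mem_cons_self))
        rcases decomp_min hdec m (Multiset.mem_coe.2 hm_cards)
            (fun x hx => hmin x (Multiset.mem_coe.1 hx)) with ⟨hcnt, hsub⟩ | ⟨h1, h2, hsub⟩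
        · left
          have hcnt' : 3 ≤ PySem.List.count cards m := by
            rw [PySem.List.count_eq]
            rw [Multiset.coe_count] at hcnt
            exact hcnt
          refine ⟨m, hut ▸ List.mem_cons_self, hcnt', ?_⟩
          have hlen3 := trip_len hcnt'
          refine (ih _ (by omega) _).2 ?_
          rw [trip_coe hcnt']
          exact hsub
        · right
          have m2 : (m+1) ∈ cards := Multiset.mem_coe.1 h1
          have m3 : (m+2) ∈ cards := Multiset.mem_coe.1 h2
          have hu2 : (m+1) ∈ m :: t :=
            hut ▸ (PySem.List.mem_sorted _ _ _ _).2 ((PySem.Set.mem_ofList _ _).2 m2)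
          have hu3 : (m+2) ∈ m :: t :=
            hut ▸ (PySem.List.mem_sorted _ _ _ _).2 ((PySem.Set.mem_ofList _ _).2 m3)
          have ht2 : (m+1) ∈ t := by
            rcases List.mem_cons.1 hu2 with h | h
            · omega
            · exact h
          have ht3 : (m+2) ∈ t := by
            rcases List.mem_cons.1 hu3 with h | h
            · omega
            · exact h
          have htlen : 2 ≤ t.length := two_mem_length ht2 ht3 (by omega)
          refine ⟨m, ?_, ⟨hut ▸ hu2, hut ▸ hu3⟩, ?_, ?_⟩
          · rw [hut]
            have : 1 ≤ (m :: t).length - 2 := by simp; omega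
            exact mem_take_head this
          · refine ⟨?_, ?_, ?_⟩ <;>
              (rw [PySem.List.count_eq]; exact List.count_pos_iff.2 (by assumption))
          · have hlen3 := run_len hm_cards m2 m3
            refine (ih _ (by omega) _).2 ?_
            rw [run_coe hm_cards m2 m3]
            exact hsub

theorem checkLoop_iff (cards : List Int) (l : List Int) :
    checkLoop cards l = true ↔
    ∃ p ∈ l, dfsMelds (pyRemove (pyRemove cards p) p) [] ≠ [] := by
  induction l with
  | nil => simp [checkLoop]
  | cons p rest ih =>
    rw [checkLoop]
    by_cases h : dfsMelds (pyRemove (pyRemove cards p) p) [] ≠ []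
    · rw [if_pos h]
      simp only [true_iff]
      exact ⟨p, List.mem_cons_self, h⟩
    · rw [if_neg h, ih]
      constructor
      · rintro ⟨q, hq, hdfs⟩
        exact ⟨q, List.mem_cons_of_mem _ hq, hdfs⟩
      · rintro ⟨q, hq, hdfs⟩
        rcases List.mem_cons.1 hq with rfl | hq'
        · exact absurd hdfs h
        · exact ⟨q, hq', hdfs⟩

theorem check_hu_iff (cards : List Int) : check_hu cards = true ↔ WinsPred cards := by
  rw [check_hu]
  by_cases hlen : cards.length % 3 = 2
  · rw [if_neg (by omega), checkLoop_iff]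
    constructor
    · rintro ⟨p, hp, hdfs⟩
      have hcnt : 2 ≤ cards.count p := by
        have := (List.mem_filter.1 hp).2
        simp only [decide_eq_true_eq, PySem.List.count_eq] at this
        exact this
      refine ⟨hlen, p, hcnt, ?_⟩
      rw [← pair_coe hcnt]
      exact (dfs_iff _ _).1 hdfs
    · rintro ⟨_, p, hcnt, hdec⟩
      have hmem : p ∈ cards := List.count_pos_iff.1 (by omega)
      refine ⟨p, ?_, ?_⟩
      · exact List.mem_filter.2 ⟨(PySem.Set.mem_ofList _ _).2 hmem,
          by simp only [decide_eq_true_eq, PySem.List.count_eq]; exact hcnt⟩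
      · exact (dfs_iff _ _).2 (by rw [pair_coe hcnt]; exact hdec)
  · rw [if_pos (by omega)]
    simp only [Bool.false_eq_true, false_iff]
    intro hw
    exact hlen hw.1

theorem sorted_two_adj {l : List Int} (hs : l.Pairwise (· ≤ ·)) {p : Int} (h : 2 ≤ l.count p) :
    ∃ l1 l2, l = l1 ++ p :: p :: l2 := by
  induction l with
  | nil => rw [List.count_nil] at h; omega
  | cons a t ih =>
    rcases List.pairwise_cons.1 hs with ⟨ha, ht⟩
    by_cases hap : a = p
    · subst hap
      have hpt : a ∈ t := by
        rw [List.count_cons_self] at h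
        exact List.count_pos_iff.1 (by omega)
      cases t with
      | nil => simp at hpt
      | cons b t2 =>
        have hb : b = a := by
          rcases List.mem_cons.1 hpt with h' | h'
          · omega
          · have h1 : a ≤ b := ha b List.mem_cons_self
            have h2 : b ≤ a := (List.pairwise_cons.1 ht).1 a h'
            omega
        subst hb
        exact ⟨[], t2, rfl⟩
    · have h' : 2 ≤ t.count p := by
        rw [List.count_cons_of_ne hap] at h
        exact h
      obtain ⟨l1, l2, rfl⟩ := ih ht h'
      exact ⟨a :: l1, l2, rfl⟩

theorem sorted_head_rep {m : Int} {t : List Int} (hp : (m :: t).Pairwise (· ≤ ·))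
    (h : 1 ≤ t.count m) : ∃ t2, t = m :: t2 := by
  cases t with
  | nil => rw [List.count_nil] at h; omega
  | cons b t2 =>
    have hmt : m ∈ b :: t2 := List.count_pos_iff.1 (by omega)
    have hb : b = m := by
      rcases List.mem_cons.1 hmt with h' | h'
      · omega
      · have h1 : m ≤ b := (List.pairwise_cons.1 hp).1 b List.mem_cons_self
        have h2 : b ≤ m := (List.pairwise_cons.1 (List.pairwise_cons.1 hp).2).1 m h'
        omega
    exact ⟨t2, by rw [hb]⟩


-- meldsRun succeeds iff the run m,m+1,m+2 can be removed and the rest decomposes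
theorem meldsRun_decomp {m : Int} {t : List Int}
    (hp : t.Pairwise (· ≤ ·))
    (IH : ∀ (l : List Int), l.length ≤ t.length → l.Pairwise (· ≤ ·) →
      (melds_alt l = true ↔ Decomp (↑l : Multiset Int))) :
    (meldsRun m t = true ↔
      (m+1) ∈ t ∧ (m+2) ∈ t ∧ Decomp (((↑t : Multiset Int).erase (m+1)).erase (m+2))) := by
  rw [meldsRun]
  by_cases hif : (m + 1) ∈ t ∧ (m + 2) ∈ t
  · rw [if_pos hif]
    obtain ⟨h1, h2⟩ := hif
    have h2e : (m + 2) ∈ t.erase (m + 1) := by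
      rw [List.mem_erase_of_ne (by omega)]; exact h2
    have chainE : pyRemove (pyRemove t (m + 1)) (m + 2) = (t.erase (m + 1)).erase (m + 2) := by
      rw [pyRemove_eq_erase h1, pyRemove_eq_erase h2e]
    have hsub : ((t.erase (m + 1)).erase (m + 2)).Sublist t :=
      (List.erase_sublist).trans (List.erase_sublist)
    rw [chainE, IH _ hsub.length_le (hp.sublist hsub)]
    rw [Multiset.coe_erase, Multiset.coe_erase]
    constructor
    · intro h; exact ⟨h1, h2, h⟩
    · rintro ⟨_, _, h⟩; exact h
  · rw [if_neg hif]
    simp only [Bool.false_eq_true, false_iff]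
    intro hc
    exact hif ⟨hc.1, hc.2.1⟩

theorem melds_alt_iff : ∀ (hand : List Int), hand.Pairwise (· ≤ ·) →
    (melds_alt hand = true ↔ Decomp (↑hand : Multiset Int)) := by
  suffices H : ∀ (n : Nat) (hand : List Int), hand.length ≤ n → hand.Pairwise (· ≤ ·) →
      (melds_alt hand = true ↔ Decomp (↑hand : Multiset Int)) by
    intro hand hp; exact H hand.length hand le_rfl hp
  intro n
  induction n with
  | zero =>
    intro hand hlen _
    have : hand = [] := List.eq_nil_of_length_eq_zero (by omega)
    subst this
    exact iff_of_true (by rw [melds_alt]) (by simpa using Decomp.nil)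
  | succ n ih =>
    intro hand hlen hp
    cases hand with
    | nil => exact iff_of_true (by rw [melds_alt]) (by simpa using Decomp.nil)
    | cons m t =>
      have hIHt : ∀ (l : List Int), l.length ≤ t.length → l.Pairwise (· ≤ ·) →
          (melds_alt l = true ↔ Decomp (↑l : Multiset Int)) := by
        intro l hl hpl
        refine ih l ?_ hpl
        simp only [List.length_cons] at hlen
        omega
      have hpt : t.Pairwise (· ≤ ·) := (List.pairwise_cons.1 hp).2
      have hmin : ∀ x ∈ (m :: t : List Int), m ≤ x := by
        intro x hx
        rcases List.mem_cons.1 hx with rfl | hx'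
        · omega
        · exact (List.pairwise_cons.1 hp).1 x hx'
      have herase : ((((m :: t : List Int)) : Multiset Int)).erase m = ↑t := by
        rw [← Multiset.cons_coe, Multiset.erase_cons_head]
      have hrun_iff := meldsRun_decomp (m := m) hpt hIHt
      -- the run disjunct, common to every shape of t
      have hrun_dec : (meldsRun m t = true ↔
          (m+1) ∈ (m :: t : List Int) ∧ (m+2) ∈ (m :: t : List Int) ∧
          Decomp ((((↑(m :: t) : Multiset Int).erase m).erase (m+1)).erase (m+2))) := by
        rw [hrun_iff, herase]
        constructor
        · rintro ⟨h1, h2, h3⟩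
          exact ⟨List.mem_cons_of_mem _ h1, List.mem_cons_of_mem _ h2, h3⟩
        · rintro ⟨h1, h2, h3⟩
          have h1' : (m+1) ∈ t := by
            rcases List.mem_cons.1 h1 with h' | h'
            · omega
            · exact h'
          have h2' : (m+2) ∈ t := by
            rcases List.mem_cons.1 h2 with h' | h'
            · omega
            · exact h'
          exact ⟨h1', h2', h3⟩
      cases t with
      | nil =>
        simp only [melds_alt, Bool.false_or]; rw [hrun_dec]
        constructor
        · rintro ⟨h1, _, _⟩
          simp only [List.mem_singleton] at h1
          omega
        · intro hd
          have := decomp_card hd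
          simp at this
      | cons b t1 =>
        cases t1 with
        | nil =>
          simp only [melds_alt, Bool.false_or]; rw [hrun_dec]
          constructor
          · rintro ⟨h1, h2, _⟩
            simp only [List.mem_cons, List.not_mem_nil, or_false] at h1 h2
            omega
          · intro hd
            have := decomp_card hd
            simp at this
        | cons c t' =>
          rw [melds_alt, Bool.or_eq_true, hrun_dec]
          constructor
          · rintro (h | h)
            · by_cases hbc : b = m ∧ c = m
              · obtain ⟨rfl, rfl⟩ := hbc
                rw [if_pos ⟨rfl, rfl⟩] at h
                have hpt' : t'.Pairwise (· ≤ ·) :=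
                  (List.pairwise_cons.1 (List.pairwise_cons.1 hpt).2).2
                have hd := (hIHt t' (by simp only [List.length_cons]; omega) hpt').1 h
                rw [← Multiset.cons_coe, ← Multiset.cons_coe, ← Multiset.cons_coe]
                exact Decomp.trip _ _ hd
              · rw [if_neg hbc] at h
                simp at h
            · obtain ⟨h1, h2, h3⟩ := h
              rw [cons3_erase_run (Multiset.mem_coe.2 List.mem_cons_self)
                    (Multiset.mem_coe.2 h1) (Multiset.mem_coe.2 h2)]
              exact Decomp.run _ _ h3
          · intro hdec
            rcases decomp_min hdec m (by simp)
                (fun x hx => hmin x (Multiset.mem_coe.1 hx)) with ⟨hcnt, hsub⟩ | ⟨h1, h2, hsub⟩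
            · left
              rw [Multiset.coe_count] at hcnt
              have hc1 : 1 ≤ (b :: c :: t').count m := by
                rw [List.count_cons_self] at hcnt; omega
              obtain ⟨t2, ht2⟩ := sorted_head_rep hp hc1
              have hb : b = m := (List.cons.inj ht2).1
              have hc2 : 1 ≤ (c :: t').count m := by
                rw [hb, List.count_cons_self, List.count_cons_self] at hcnt; omega
              have hp2 : (m :: c :: t').Pairwise (· ≤ ·) := by
                rw [hb] at hp
                exact (List.pairwise_cons.1 hp).2
              obtain ⟨t3, ht3⟩ := sorted_head_rep hp2 hc2
              have hcb : c = m := (List.cons.inj ht3).1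
              rw [if_pos ⟨hb, hcb⟩]
              have hpt' : t'.Pairwise (· ≤ ·) :=
                (List.pairwise_cons.1 (List.pairwise_cons.1 hpt).2).2
              refine (hIHt t' (by simp only [List.length_cons]; omega) hpt').2 ?_
              rw [hb, hcb] at hsub
              have e0 : (((((m :: m :: m :: t' : List Int) : Multiset Int)).erase m).erase m).erase m = ↑t' := by
                rw [← Multiset.cons_coe, ← Multiset.cons_coe, ← Multiset.cons_coe,
                    Multiset.erase_cons_head, Multiset.erase_cons_head, Multiset.erase_cons_head]
              rw [e0] at hsub
              exact hsub
            · right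
              exact ⟨Multiset.mem_coe.1 h1, Multiset.mem_coe.1 h2, hsub⟩

theorem split_pair_erase {l1 l2 : List Int} {x : Int} :
    ((↑(l1 ++ x :: x :: l2) : Multiset Int).erase x).erase x = ↑(l1 ++ l2) := by
  have key : (↑(l1 ++ x :: x :: l2) : Multiset Int) = x ::ₘ x ::ₘ ↑(l1 ++ l2) := by
    rw [← Multiset.coe_add, ← Multiset.coe_add, ← Multiset.cons_coe, ← Multiset.cons_coe]
    rw [Multiset.add_cons, Multiset.add_cons]
  rw [key, Multiset.erase_cons_head, Multiset.erase_cons_head]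

theorem scanPair_iff : ∀ (hand pre : List Int),
    (scanPair pre hand = true ↔
      ∃ l1 x l2, hand = l1 ++ x :: x :: l2 ∧ melds_alt (pre ++ (l1 ++ l2)) = true) := by
  intro hand
  induction hand with
  | nil =>
    intro pre
    constructor
    · intro h; simp [scanPair] at h
    · rintro ⟨l1, x, l2, heq, _⟩
      cases l1 <;> simp at heq
  | cons a tail ih =>
    intro pre
    cases tail with
    | nil =>
      constructor
      · intro h; simp [scanPair] at h
      · rintro ⟨l1, x, l2, heq, _⟩
        cases l1 with
        | nil => simp at heq
        | cons y l1' =>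
          rcases List.cons.inj heq with ⟨_, heq2⟩
          cases l1' <;> simp at heq2
    | cons b rest =>
      have step : scanPair pre (a :: b :: rest) =
          if a = b ∧ melds_alt (pre ++ rest) = true then true
          else scanPair (pre ++ [a]) (b :: rest) := by
        rw [scanPair]
      rw [step]
      by_cases hab : a = b ∧ melds_alt (pre ++ rest) = true
      · rw [if_pos hab]
        constructor
        · intro _
          refine ⟨[], a, rest, ?_, ?_⟩
          · rw [← hab.1]; rfl
          · simpa using hab.2
        · intro _; rfl
      · rw [if_neg hab, ih (pre ++ [a])]
        constructor
        · rintro ⟨l1, x, l2, heq, hm⟩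
          refine ⟨a :: l1, x, l2, by rw [List.cons_append, heq], ?_⟩
          have e : (pre ++ [a]) ++ (l1 ++ l2) = pre ++ (a :: l1 ++ l2) := by simp
          rw [← e]
          exact hm
        · rintro ⟨l1, x, l2, heq, hm⟩
          cases l1 with
          | nil =>
            exfalso
            rcases List.cons.inj heq with ⟨h1, heq2⟩
            rcases List.cons.inj heq2 with ⟨h2, h3⟩
            refine hab ⟨by omega, ?_⟩
            rw [h3]
            simpa using hm
          | cons y l1' =>
            rcases List.cons.inj heq with ⟨h1, heq2⟩
            refine ⟨l1', x, l2, heq2, ?_⟩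
            have e : (pre ++ [a]) ++ (l1' ++ l2) = pre ++ (a :: l1' ++ l2) := by simp
            rw [e, h1]
            exact hm

theorem wins_iff (hand : List Int) (hs : hand.Pairwise (· ≤ ·)) :
    wins hand = true ↔ WinsPred hand := by
  rw [wins]
  by_cases hlen : hand.length % 3 = 2
  · rw [if_neg (by omega), scanPair_iff]
    constructor
    · rintro ⟨l1, x, l2, heq, hm⟩
      refine ⟨hlen, x, ?_, ?_⟩
      · rw [heq]
        simp only [List.count_append, List.count_cons_self]
        omega
      · have hsubl : (l1 ++ l2).Sublist hand := by
          rw [heq]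
          exact List.Sublist.append_left
            ((List.sublist_cons_self x l2).trans (List.sublist_cons_self x (x :: l2))) l1
        have hd := (melds_alt_iff (l1 ++ l2) (hs.sublist hsubl)).1 (by simpa using hm)
        rw [heq, split_pair_erase]
        exact hd
    · rintro ⟨_, p, hcnt, hdec⟩
      obtain ⟨l1, l2, heq⟩ := sorted_two_adj hs hcnt
      refine ⟨l1, p, l2, heq, ?_⟩
      simp only [List.nil_append]
      have hsubl : (l1 ++ l2).Sublist hand := by
        rw [heq]
        exact List.Sublist.append_left
          ((List.sublist_cons_self p l2).trans (List.sublist_cons_self p (p :: l2))) l1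
      refine (melds_alt_iff (l1 ++ l2) (hs.sublist hsubl)).2 ?_
      rw [heq] at hdec
      rw [split_pair_erase] at hdec
      exact hdec
  · rw [if_pos (by omega)]
    simp only [Bool.false_eq_true, false_iff]
    intro hw
    exact hlen hw.1

theorem winsPred_perm {l l' : List Int} (h : l.Perm l') : WinsPred l ↔ WinsPred l' := by
  unfold WinsPred
  rw [h.length_eq, Multiset.coe_eq_coe.2 h]
  constructor
  · rintro ⟨h1, p, h2, h3⟩
    exact ⟨h1, p, by rw [← h.count_eq p]; exact h2, h3⟩
  · rintro ⟨h1, p, h2, h3⟩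
    exact ⟨h1, p, by rw [h.count_eq p]; exact h2, h3⟩

theorem sorted_id_pairwise (l : List Int) :
    (PySem.List.sorted l (fun x => x) false).Pairwise (· ≤ ·) := by
  have := PySem.List.sorted_pairwise (xs := l) (key := fun x => x)
  simpa using this

theorem point_eq (cards : List Int) (i : Int) :
    check_hu (cards ++ [i]) = wins (PySem.List.sorted (cards ++ [i]) (fun x => x) false) := by
  have e1 := check_hu_iff (cards ++ [i])
  have e2 := wins_iff (PySem.List.sorted (cards ++ [i]) (fun x => x) false)
    (sorted_id_pairwise _)
  have hperm : (PySem.List.sorted (cards ++ [i]) (fun x => x) false).Perm (cards ++ [i]) :=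
    PySem.List.sorted_perm _ _ _
  have : check_hu (cards ++ [i]) = true ↔
      wins (PySem.List.sorted (cards ++ [i]) (fun x => x) false) = true := by
    rw [e1, e2]
    exact (winsPred_perm hperm).symm
  cases hA : check_hu (cards ++ [i]) <;> cases hB : wins (PySem.List.sorted (cards ++ [i]) (fun x => x) false)
  · rfl
  · rw [hA, hB] at this; simp at this
  · rw [hA, hB] at this; simp at this
  · rfl

theorem wins_pair_self (i : Int) :
    wins (PySem.List.sorted ([i] ++ [i]) (fun x => x) false) = true := by
  have e : ([i] ++ [i] : List Int) = [i, i] := rfl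
  rw [e]
  have hsort : PySem.List.sorted [i, i] (fun x => x) false = [i, i] := by
    apply PySem.List.sorted_eq_self_of_pairwise
    exact List.pairwise_cons.2 ⟨by intro y hy; simp at hy; omega, List.pairwise_singleton _ _⟩
  rw [hsort, wins, if_neg (by simp)]
  rw [scanPair]
  rw [if_pos ⟨rfl, by simp only [List.nil_append]; rw [melds_alt]⟩]

theorem wins_pair_ne {i j : Int} (h : j ≠ i) :
    wins (PySem.List.sorted ([i] ++ [j]) (fun x => x) false) = false := by
  by_contra hne
  have htrue : wins (PySem.List.sorted ([i] ++ [j]) (fun x => x) false) = true := by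
    cases hval : wins (PySem.List.sorted ([i] ++ [j]) (fun x => x) false)
    · exact absurd hval hne
    · rfl
  have hw := (wins_iff _ (sorted_id_pairwise _)).1 htrue
  have hw2 := (winsPred_perm (PySem.List.sorted_perm _ _ _)).1 hw
  obtain ⟨_, p, hcnt, _⟩ := hw2
  simp only [List.count_append, List.count_cons, List.count_nil] at hcnt
  by_cases hip : i = p <;> by_cases hjp : j = p
  all_goals simp [hip, hjp] at hcnt
  all_goals omega

theorem foldl_fixed {f : List Int → Int → List Int} {b : List Int} :
    ∀ (rest : List Int), (∀ j ∈ rest, f b j = b) → rest.foldl f b = b := by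
  intro rest
  induction rest with
  | nil => intro _; rfl
  | cons j rest ih =>
    intro h
    rw [List.foldl_cons, h j List.mem_cons_self]
    exact ih (fun x hx => h x (List.mem_cons_of_mem _ hx))

theorem loops_eq (cards : List Int) : ∀ (l : List Int) (acc : List Int), l.Nodup →
    fphLoop cards acc l =
    l.foldl (fun acc i =>
      if i = 10 ∨ i = 20 then acc
      else if wins (PySem.List.sorted (cards ++ [i]) (fun x => x) false) = true then acc ++ [i]
      else acc) acc := by
  intro l
  induction l with
  | nil => intro acc _; rw [fphLoop]; rfl
  | cons i rest ih =>
    intro acc hnd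
    have hnotin : i ∉ rest := (List.nodup_cons.1 hnd).1
    have hnd' : rest.Nodup := (List.nodup_cons.1 hnd).2
    rw [fphLoop, List.foldl_cons]
    by_cases h10 : i ∈ ([10, 20] : List Int)
    · rw [if_pos h10]
      have hB : i = 10 ∨ i = 20 := by simpa using h10
      rw [if_pos hB]
      exact ih acc hnd'
    · rw [if_neg h10]
      have hB : ¬(i = 10 ∨ i = 20) := by simpa using h10
      rw [if_neg hB]
      by_cases hsp : cards = [i] ∧ (cards ++ [i]).length = 2
      · rw [if_pos hsp]
        obtain ⟨hc, _⟩ := hsp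
        rw [hc, wins_pair_self i, if_pos rfl]
        refine (foldl_fixed rest ?_).symm
        intro j hj
        have hji : j ≠ i := fun hji => hnotin (hji ▸ hj)
        by_cases hj10 : j = 10 ∨ j = 20
        · rw [if_pos hj10]
        · rw [if_neg hj10, wins_pair_ne hji]
          rw [if_neg (by simp)]
      · rw [if_neg hsp, point_eq cards i]
        by_cases hw : wins (PySem.List.sorted (cards ++ [i]) (fun x => x) false) = true
        · rw [if_pos hw, if_pos hw]
          exact ih _ hnd'
        · rw [if_neg hw, if_neg hw]
          exact ih _ hnd'

-- when no candidate can make the hand length ≡ 2 (mod 3), A's loop accumulates nothing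
theorem fphLoop_len (cards : List Int) (hlen : cards.length % 3 ≠ 1) :
    ∀ (l acc : List Int), fphLoop cards acc l = acc := by
  intro l
  induction l with
  | nil => intro acc; rw [fphLoop]
  | cons i rest ih =>
    intro acc
    rw [fphLoop]
    by_cases h10 : i ∈ ([10, 20] : List Int)
    · rw [if_pos h10]; exact ih acc
    · rw [if_neg h10]
      have hsp : ¬(cards = [i] ∧ (cards ++ [i]).length = 2) := by
        rintro ⟨hc, _⟩
        rw [hc] at hlen
        simp at hlen
      rw [if_neg hsp]
      have hch : ¬(check_hu (cards ++ [i]) = true) := by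
        intro hc
        have := (check_hu_iff _).1 hc
        have hl := this.1
        rw [List.length_append, List.length_cons, List.length_nil] at hl
        omega
      rw [if_neg hch]
      exact ih acc

-- ===== VERDICT (by name: the statement is the Claim_ definition above) =====
theorem find_possible_hu_spec : Claim_equal_find_possible_hu := by
  intro cards _
  unfold Spec_find_possible_hu find_possible_hu find_possible_hu_alt
  by_cases hlen : cards.length % 3 = 1
  · rw [if_neg (by omega)]
    exact loops_eq cards _ [] (PySem.List.nodup_pyRange_one 1 30)
  · rw [if_pos (by omega)]
    exact fphLoop_len cards (by omega) _ []
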